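-- pv_equiv track=rewrite | github.com/brickZA/superleague | superleague/rankings.py | rank_scores
-- ===== SOURCE A (Python) =====
-- def rank_scores(points):
--     """Sort and rank teams according to league points
--
--     Parameters
--     ----------
--     points : dict str->int
--         Team names as keys, league points as value
--
--     Returns
--     -------
--     ranking_output : list of (ranking, team, points_score) tuples
--        ranking : int
--        team : str
--        points_score : int
--
--     Notes
--     -----
--
--     Sorted by score and alphabetically if rankings are tied.
--
--     """
--     # Sort first by the league points (input dict's values), but negative to
--     # sort descending, then by team name using the `sorted` builtin's `key`
--     # argument
--     sorted_rankings = sorted(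
--         points.items(), key=lambda item: (-item[1], item[0]))
--     ranking = 1
--     prev_score = None
--     prev_ranking = 1
--     ranking_output = []
--     for i, (team, points_score) in enumerate(sorted_rankings, 1):
--         if points_score == prev_score:
--             ranking = prev_ranking
--         else:
--             ranking = i
--         prev_score = points_score
--         prev_ranking = ranking
--         ranking_output.append((ranking, team, points_score))
--     return ranking_output
-- ===== SOURCE B (Python) =====
-- def rank_scores(points):
--     """Rank teams by points (descending, alphabetical tiebreak), competition ranking.
--
--     Counting re-implementation: the rank of a score is 1 + (number of teams with a
--     strictly higher score). Build a score-frequency table, prefix-sum it over the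
--     distinct scores in descending order to get a score->rank map, then attach that
--     rank to every (team, score) pair of the sorted list -- no positional scan at all.
--     """
--     counts = {}
--     for s in points.values():
--         counts[s] = counts.get(s, 0) + 1
--     rank_of = {}
--     total = 0
--     for s in sorted(counts, reverse=True):
--         rank_of[s] = total + 1
--         total += counts[s]
--     ordered = sorted(points.items(), key=lambda item: (-item[1], item[0]))
--     return [(rank_of[s], team, s) for team, s in ordered]
-- ===== Notes on version B (the rewrite author's own statement) =====
-- stated objective: alternative
-- what changed: Replaces A's positional prev_score/prev_ranking scan by a counting method: build a score-frequency dict, prefix-sum it over the distinct scores in descending order into a score->rank map (rank = 1 + number of teams with a strictly higher score), and attach that rank to each pair of the sorted list.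
import Mathlib
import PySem

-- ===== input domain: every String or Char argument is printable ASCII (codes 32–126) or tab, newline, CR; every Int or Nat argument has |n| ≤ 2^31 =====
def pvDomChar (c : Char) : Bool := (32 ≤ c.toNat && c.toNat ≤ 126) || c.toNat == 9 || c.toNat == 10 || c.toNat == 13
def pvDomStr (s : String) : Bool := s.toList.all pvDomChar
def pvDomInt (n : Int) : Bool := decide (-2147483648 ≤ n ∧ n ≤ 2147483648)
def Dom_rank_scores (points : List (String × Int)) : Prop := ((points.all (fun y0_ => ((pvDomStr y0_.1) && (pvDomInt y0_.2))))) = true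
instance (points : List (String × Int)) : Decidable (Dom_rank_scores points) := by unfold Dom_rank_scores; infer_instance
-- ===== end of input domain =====

-- B replaces A's positional prev_score/prev_ranking scan by a counting method: a score-frequency
-- dict prefix-summed over the distinct scores in descending order gives each score its rank
-- (1 + number of teams with a strictly higher score); objective: alternative algorithm, same cost.

-- ===== PORT A =====
-- A: sort items by (-score, name), then one pass with enumerate(…, 1) carrying
-- (ranking, prev_score, prev_ranking, output).
def rank_scores (points : List (String × Int)) : List (Int × String × Int) :=
  let sorted_rankings := PySem.List.sorted2 (PySem.Dict.ofList points).items
      (fun item => -item.2) (fun item => item.1)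
  let st := (PySem.List.enumerate sorted_rankings 1).foldl
    (fun (st : Int × Option Int × Int × List (Int × String × Int)) ip =>
      let ranking := if some ip.2.2 = st.2.1 then st.2.2.1 else ip.1
      (ranking, some ip.2.2, ranking, st.2.2.2 ++ [(ranking, ip.2.1, ip.2.2)]))
    (1, none, 1, [])
  st.2.2.2

-- ===== PORT B =====
-- B: counts[s] = multiplicity of score s; rank_of[s] = prefix sum + 1 over distinct scores
-- sorted descending; output = sorted items decorated with rank_of[score].
-- (rank_of[s] in the Python comprehension can never raise KeyError — every score of an item
--  is a key of counts and hence of rank_of — so it is ported as getD with default 0.)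
def rank_scores_alt (points : List (String × Int)) : List (Int × String × Int) :=
  let d := PySem.Dict.ofList points
  let counts := d.values.foldl
    (fun (c : PySem.Dict Int Int) s => c.insert s (c.getD s 0 + 1)) PySem.Dict.empty
  let st := (PySem.List.sorted counts.keys (fun s => s) true).foldl
    (fun (st : PySem.Dict Int Int × Int) s => (st.1.insert s (st.2 + 1), st.2 + counts.getD s 0))
    (PySem.Dict.empty, 0)
  let rank_of := st.1
  let ordered := PySem.List.sorted2 d.items (fun item => -item.2) (fun item => item.1)
  ordered.map (fun ts => (rank_of.getD ts.2 0, ts.1, ts.2))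

-- ===== PRECONDITION & SPEC =====
def Spec_rank_scores (points : List (String × Int)) (out : List (Int × String × Int)) : Prop := out = rank_scores_alt points
instance (points : List (String × Int)) (out : List (Int × String × Int)) : Decidable (Spec_rank_scores points out) := by unfold Spec_rank_scores; infer_instance

-- ===== CLAIM (what is proved, stated in full; the proofs are below) =====
def Claim_equal_rank_scores : Prop := ∀ (points : List (String × Int)), Dom_rank_scores points → Spec_rank_scores points (rank_scores points)

-- ===== LEMMAS AND PROOFS =====


-- ---- common normal form: both programs compute, for each item of the sorted list,
-- ---- the rank 1 + (number of items with a strictly higher score) ----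
def rankMap (l : List (String × Int)) (pos : Int) : List (Int × String × Int) :=
  l.map (fun x => (pos + (l.countP (fun y => decide (x.2 < y.2)) : Int), x.1, x.2))

-- ---- A side: loop as recursion, then runs-of-equal-scores form ----
def recA : List (String × Int) → Int → Option Int → Int → List (Int × String × Int)
  | [], _, _, _ => []
  | x :: rest, i, prev, pr =>
    let r := if some x.2 = prev then pr else i
    (r, x.1, x.2) :: recA rest (i + 1) (some x.2) r

def grp : List (String × Int) → Int → List (Int × String × Int)
  | [], _ => []
  | x :: xs, pos =>
    let g := xs.takeWhile (fun y => y.2 == x.2)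
    (x :: g).map (fun ts => (pos, ts.1, ts.2))
      ++ grp (xs.dropWhile (fun y => y.2 == x.2)) (pos + 1 + g.length)
termination_by xs _ => xs.length
decreasing_by
  have := List.length_dropWhile_le (fun (y : String × Int) => y.2 == x.2) xs
  simp; omega

theorem foldA (xs : List (String × Int)) :
    ∀ (i : Int) (r0 : Int) (prev : Option Int) (pr : Int) (out : List (Int × String × Int)),
    ((PySem.List.enumerate xs i).foldl
      (fun (st : Int × Option Int × Int × List (Int × String × Int)) ip =>
        let ranking := if some ip.2.2 = st.2.1 then st.2.2.1 else ip.1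
        (ranking, some ip.2.2, ranking, st.2.2.2 ++ [(ranking, ip.2.1, ip.2.2)]))
      (r0, prev, pr, out)).2.2.2 = out ++ recA xs i prev pr := by
  induction xs with
  | nil => intro i r0 prev pr out; simp [PySem.List.enumerate_nil, recA]
  | cons x rest ih =>
    intro i r0 prev pr out
    rw [PySem.List.enumerate_cons, List.foldl_cons, ih]
    simp only [recA]
    by_cases h : some x.2 = prev <;> simp [h]

theorem runA (g : List (String × Int)) :
    ∀ (rest : List (String × Int)) (s : Int) (k : Int) (r : Int), (∀ y ∈ g, y.2 = s) →
    recA (g ++ rest) k (some s) r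
      = g.map (fun ts => (r, ts.1, ts.2)) ++ recA rest (k + g.length) (some s) r := by
  induction g with
  | nil => intro rest s k r _; simp
  | cons y t ih =>
    intro rest s k r h
    have hy : y.2 = s := h y (by simp)
    simp only [List.cons_append, recA, hy, if_true, List.map_cons, List.cons_append]
    rw [ih rest s (k + 1) r (fun z hz => h z (by simp [hz]))]
    have hlen : k + 1 + (t.length : Int) = k + ((y :: t).length : Int) := by
      simp only [List.length_cons]; push_cast; ring
    rw [hlen]

theorem head_dropWhile_false {α : Type} (p : α → Bool) (l : List α) :
    ∀ y, (l.dropWhile p).head? = some y → p y = false := by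
  induction l with
  | nil => intro y h; simp at h
  | cons x t ih =>
    intro y h
    by_cases hx : p x
    · rw [List.dropWhile_cons_of_pos hx] at h; exact ih y h
    · rw [List.dropWhile_cons_of_neg hx] at h
      simp at h
      subst h
      simpa using hx

theorem recA_eq_grp (n : Nat) :
    ∀ (xs : List (String × Int)), xs.length ≤ n →
    ∀ (i : Int) (prev : Option Int) (pr : Int),
    (∀ y, xs.head? = some y → prev ≠ some y.2) →
    recA xs i prev pr = grp xs i := by
  induction n with
  | zero =>
    intro xs hlen i prev pr _
    have : xs = [] := List.length_eq_zero_iff.mp (Nat.le_zero.mp hlen)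
    subst this; simp [recA, grp]
  | succ m ih =>
    intro xs hlen i prev pr hfresh
    match xs with
    | [] => simp [recA, grp]
    | x :: rest =>
      have hne : ¬ (some x.2 = prev) := fun h => hfresh x rfl h.symm
      have hsplit := List.takeWhile_append_dropWhile
        (p := fun (y : String × Int) => y.2 == x.2) (l := rest)
      have hall : ∀ y ∈ rest.takeWhile (fun y => y.2 == x.2), y.2 = x.2 := by
        intro y hy
        have := List.mem_takeWhile_imp hy
        simpa using this
      calc recA (x :: rest) i prev pr
          = (i, x.1, x.2) :: recA rest (i + 1) (some x.2) i := by
            simp only [recA, if_neg hne]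
        _ = (i, x.1, x.2) ::
              ((rest.takeWhile (fun y => y.2 == x.2)).map (fun ts => (i, ts.1, ts.2))
                ++ recA (rest.dropWhile (fun y => y.2 == x.2))
                    (i + 1 + (rest.takeWhile (fun y => y.2 == x.2)).length)
                    (some x.2) i) := by
            conv_lhs => rw [← hsplit]
            rw [runA _ _ _ _ _ hall]
        _ = grp (x :: rest) i := by
            rw [grp]
            have hlen2 : (rest.dropWhile (fun y => y.2 == x.2)).length ≤ m := by
              have := List.length_dropWhile_le (fun (y : String × Int) => y.2 == x.2) rest
              simp at hlen; omega
            rw [ih _ hlen2 _ _ _ (by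
              intro y hy h
              have := head_dropWhile_false (fun (y : String × Int) => y.2 == x.2) rest y hy
              simp at this
              exact this (by injection h with h'; exact h'.symm))]
            simp

-- ---- sortedness of the shared sorted list: scores are non-increasing ----

theorem insertBy_pairwise_snd_ge (x : String × Int) (ys : List (String × Int))
    (h : ys.Pairwise (fun a b => b.2 ≤ a.2)) :
    (PySem.List.insertBy
      (fun a b => decide (-a.2 < -b.2) || (!decide (-b.2 < -a.2) && decide (a.1 < b.1)))
      x ys).Pairwise (fun a b => b.2 ≤ a.2) := by
  induction ys with
  | nil => simp [PySem.List.insertBy]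
  | cons y t ih =>
    rw [PySem.List.insertBy]
    rcases List.pairwise_cons.mp h with ⟨hy, ht⟩
    split_ifs with hb
    · -- x goes first: x ≥ y ≥ everything
      have hxy : y.2 ≤ x.2 := by
        simp only [Bool.or_eq_true, Bool.and_eq_true, Bool.not_eq_true', decide_eq_true_iff,
          decide_eq_false_iff_not] at hb
        rcases hb with h1 | ⟨h1, _⟩ <;> omega
      refine List.pairwise_cons.mpr ⟨?_, h⟩
      intro z hz
      rcases List.mem_cons.mp hz with rfl | hz
      · exact hxy
      · exact le_trans (hy z hz) hxy
    · -- y stays first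
      have hyx : x.2 ≤ y.2 := by
        simp only [Bool.or_eq_true, Bool.and_eq_true, Bool.not_eq_true', decide_eq_true_iff,
          decide_eq_false_iff_not, not_or, not_and] at hb
        omega
      refine List.pairwise_cons.mpr ⟨?_, ih ht⟩
      intro z hz
      rcases (PySem.List.mem_insertBy _ _ _ _).mp hz with rfl | hz
      · exact hyx
      · exact hy z hz

theorem sorted2_pairwise_snd_ge (xs : List (String × Int)) :
    (PySem.List.sorted2 xs (fun item => -item.2) (fun item => item.1)).Pairwise
      (fun a b => b.2 ≤ a.2) := by
  show (xs.foldl (fun acc x => PySem.List.insertBy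
      (fun a b => decide (-a.2 < -b.2) || (!decide (-b.2 < -a.2) && decide (a.1 < b.1)))
      x acc) []).Pairwise (fun a b => b.2 ≤ a.2)
  generalize hacc : ([] : List (String × Int)) = acc
  have hp : acc.Pairwise (fun a b => b.2 ≤ a.2) := by subst hacc; simp
  clear hacc
  induction xs generalizing acc with
  | nil => simpa
  | cons x t ih => exact ih _ (insertBy_pairwise_snd_ge x acc hp)

-- ---- grp on a score-sorted list assigns 1 + (number of strictly larger scores) ----

theorem drop_lt (x : String × Int) :
    ∀ (rest : List (String × Int)), rest.Pairwise (fun a b => b.2 ≤ a.2) →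
    (∀ y ∈ rest, y.2 ≤ x.2) →
    ∀ z ∈ rest.dropWhile (fun y => y.2 == x.2), z.2 < x.2 := by
  intro rest
  induction rest with
  | nil => intro _ _ z hz; simp at hz
  | cons r t ih =>
    intro hp hle z hz
    rcases List.pairwise_cons.mp hp with ⟨hr, ht⟩
    by_cases hrx : (r.2 == x.2) = true
    · rw [List.dropWhile_cons_of_pos (p := fun (y : String × Int) => y.2 == x.2) hrx] at hz
      exact ih ht (fun y hy => hle y (List.mem_cons_of_mem _ hy)) z hz
    · rw [List.dropWhile_cons_of_neg (p := fun (y : String × Int) => y.2 == x.2) hrx] at hz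
      have hrlt : r.2 < x.2 := by
        have := hle r (List.mem_cons_self ..)
        simp at hrx
        omega
      rcases List.mem_cons.mp hz with rfl | hz
      · exact hrlt
      · exact lt_of_le_of_lt (hr z hz) hrlt

theorem grp_eq_rankMap (n : Nat) :
    ∀ (l : List (String × Int)), l.length ≤ n →
    l.Pairwise (fun a b => b.2 ≤ a.2) → ∀ (pos : Int),
    grp l pos = rankMap l pos := by
  induction n with
  | zero =>
    intro l hlen _ pos
    have : l = [] := List.length_eq_zero_iff.mp (Nat.le_zero.mp hlen)
    subst this; simp [grp, rankMap]
  | succ m ih =>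
    intro l hlen hp pos
    match l with
    | [] => simp [grp, rankMap]
    | x :: rest =>
      rcases List.pairwise_cons.mp hp with ⟨hx, hrest⟩
      set g := rest.takeWhile (fun y => y.2 == x.2) with hg
      set dr := rest.dropWhile (fun y => y.2 == x.2) with hdr
      have hsplit : rest = g ++ dr := (List.takeWhile_append_dropWhile ..).symm
      have hgeq : ∀ y ∈ g, y.2 = x.2 := by
        intro y hy; have := List.mem_takeWhile_imp hy; simpa using this
      have hdrlt : ∀ z ∈ dr, z.2 < x.2 := drop_lt x rest hrest hx
      have hdrp : dr.Pairwise (fun a b => b.2 ≤ a.2) :=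
        hrest.sublist (List.dropWhile_sublist _)
      have hdrlen : dr.length ≤ m := by
        have h2 : dr.length ≤ rest.length := by
          rw [hdr]; exact List.length_dropWhile_le (fun (y : String × Int) => y.2 == x.2) rest
        simp at hlen; omega
      rw [grp]
      rw [ih dr hdrlen hdrp (pos + 1 + g.length)]
      -- now compute rankMap (x :: rest) pos
      unfold rankMap
      rw [show (x :: rest) = (x :: g) ++ dr by rw [hsplit]; rfl]
      rw [List.map_append]
      congr 1
      · -- head run: count of strictly larger = 0
        apply List.map_congr_left
        intro z hz
        have hz2 : z.2 = x.2 := by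
          rcases List.mem_cons.mp hz with rfl | hz'
          · rfl
          · exact hgeq z hz'
        have hcnt : ((x :: g) ++ dr).countP (fun y => decide (z.2 < y.2)) = 0 := by
          rw [List.countP_eq_zero]
          intro y hy
          simp only [decide_eq_true_iff, not_lt] at *
          rcases List.mem_append.mp hy with hy | hy
          · rcases List.mem_cons.mp hy with rfl | hy'
            · omega
            · have := hgeq y hy'; omega
          · have := hdrlt y hy; omega
        rw [hcnt]
        simp
      · -- tail: count of strictly larger = 1 + g.length + count within dr
        apply List.map_congr_left
        intro z hz
        have hzlt : z.2 < x.2 := hdrlt z hz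
        have hcnt : ((x :: g) ++ dr).countP (fun y => decide (z.2 < y.2))
            = (g.length + 1) + dr.countP (fun y => decide (z.2 < y.2)) := by
          rw [List.countP_append]
          congr 1
          rw [List.countP_eq_length.mpr]
          · simp
          · intro y hy
            rcases List.mem_cons.mp hy with rfl | hy'
            · simpa using hzlt
            · have := hgeq y hy'; simp; omega
        rw [hcnt]
        simp only [Prod.mk.injEq, and_true]
        push_cast
        ring

-- ---- B side: the rank_of prefix-sum fold and the counting identities ----

theorem rkFold_notmem (c : Int → Int) (s : Int) :
    ∀ (ks : List Int) (rk : PySem.Dict Int Int) (t : Int), s ∉ ks →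
    ((ks.foldl (fun (st : PySem.Dict Int Int × Int) k => (st.1.insert k (st.2 + 1), st.2 + c k))
      (rk, t)).1.getD s 0) = rk.getD s 0 := by
  intro ks
  induction ks with
  | nil => intro rk t _; simp
  | cons k ks' ih =>
    intro rk t hs
    rw [List.foldl_cons, ih _ _ (fun h => hs (List.mem_cons_of_mem _ h))]
    exact PySem.Dict.getD_insert_of_ne _ _ _ (fun h => hs (h ▸ List.mem_cons_self ..))

theorem rkFold_mem (c : Int → Int) (s : Int) :
    ∀ (ks : List Int), ks.Pairwise (fun a b => b < a) →
    ∀ (rk : PySem.Dict Int Int) (t : Int), s ∈ ks →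
    ((ks.foldl (fun (st : PySem.Dict Int Int × Int) k => (st.1.insert k (st.2 + 1), st.2 + c k))
      (rk, t)).1.getD s 0)
      = t + 1 + ((ks.takeWhile (fun k => decide (s < k))).map c).sum := by
  intro ks
  induction ks with
  | nil => intro _ _ _ h; simp at h
  | cons k ks' ih =>
    intro hp rk t hs
    rcases List.pairwise_cons.mp hp with ⟨hk, hks'⟩
    rw [List.foldl_cons]
    by_cases hsk : s = k
    · subst hsk
      have hnot : s ∉ ks' := fun h => lt_irrefl s (hk s h)
      rw [rkFold_notmem c s ks' _ _ hnot]
      rw [PySem.Dict.getD_insert_self]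
      rw [List.takeWhile_cons_of_neg (by simp)]
      simp
    · have hmem : s ∈ ks' := (List.mem_cons.mp hs).resolve_left hsk
      have hlt : s < k := hk s hmem
      rw [ih hks' _ _ hmem]
      rw [List.takeWhile_cons_of_pos (by simpa using hlt)]
      simp only [List.map_cons, List.sum_cons]
      ring

theorem takeWhile_eq_filter_desc (s : Int) :
    ∀ (ks : List Int), ks.Pairwise (fun a b => b < a) →
    ks.takeWhile (fun k => decide (s < k)) = ks.filter (fun k => decide (s < k)) := by
  intro ks
  induction ks with
  | nil => intro _; rfl
  | cons k ks' ih =>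
    intro hp
    rcases List.pairwise_cons.mp hp with ⟨hk, hks'⟩
    by_cases hsk : s < k
    · rw [List.takeWhile_cons_of_pos (by simpa using hsk),
        List.filter_cons_of_pos (by simpa using hsk), ih hks']
    · rw [List.takeWhile_cons_of_neg (by simpa using hsk),
        List.filter_cons_of_neg (by simpa using hsk)]
      symm
      rw [List.filter_eq_nil_iff]
      intro a ha
      have := hk a ha
      simp
      omega

theorem indicator_sum (v : Int) (p : Int → Bool) :
    ∀ (ks : List Int), ks.Nodup → v ∈ ks →
    ((ks.filter p).map (fun k => if k = v then (1 : Int) else 0)).sum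
      = if p v then (1 : Int) else 0 := by
  intro ks
  induction ks with
  | nil => intro _ h; simp at h
  | cons k ks' ih =>
    intro hnd hv
    rcases List.nodup_cons.mp hnd with ⟨hk, hnd'⟩
    by_cases hkv : k = v
    · subst hkv
      have hzero : ((ks'.filter p).map (fun x => if x = k then (1 : Int) else 0)).sum = 0 := by
        apply List.sum_eq_zero
        intro x hx
        rcases List.mem_map.mp hx with ⟨a, ha, rfl⟩
        have : a ≠ k := fun h => hk (h ▸ List.mem_of_mem_filter ha)
        simp [this]
      by_cases hpv : p k
      · rw [List.filter_cons_of_pos hpv]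
        simp [hzero, hpv]
      · rw [List.filter_cons_of_neg (by simpa using hpv)]
        simp [hzero, hpv]
    · have hv' : v ∈ ks' := (List.mem_cons.mp hv).resolve_left (fun h => hkv h.symm)
      by_cases hpk : p k
      · rw [List.filter_cons_of_pos hpk]
        simp only [List.map_cons, List.sum_cons, if_neg hkv, zero_add]
        exact ih hnd' hv'
      · rw [List.filter_cons_of_neg (by simpa using hpk)]
        exact ih hnd' hv'

theorem sum_count_filter_eq_countP (p : Int → Bool) :
    ∀ (vs : List Int) (ks : List Int), ks.Nodup → (∀ v ∈ vs, v ∈ ks) →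
    ((ks.filter p).map (fun k => (vs.count k : Int))).sum = (vs.countP p : Int) := by
  intro vs
  induction vs with
  | nil =>
    intro ks _ _
    simp only [List.count_nil, List.countP_nil, Nat.cast_zero]
    exact List.sum_eq_zero (by intro x hx; rcases List.mem_map.mp hx with ⟨a, _, rfl⟩; simp)
  | cons v vs' ih =>
    intro ks hnd hmem
    have hv : v ∈ ks := hmem v (List.mem_cons_self ..)
    have hsplit : ((ks.filter p).map (fun k => ((v :: vs').count k : Int))).sum
        = ((ks.filter p).map (fun k => (vs'.count k : Int))).sum
          + ((ks.filter p).map (fun k => if k = v then (1 : Int) else 0)).sum := by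
      rw [← List.sum_map_add]
      apply congrArg
      apply List.map_congr_left
      intro k _
      rw [List.count_cons]
      by_cases hkv : k = v
      · simp [hkv]
      · simp [hkv, Ne.symm hkv]
    rw [hsplit, ih ks hnd (fun w hw => hmem w (List.mem_cons_of_mem _ hw)),
      indicator_sum v p ks hnd hv, List.countP_cons]
    by_cases hpv : p v <;> simp [hpv]

-- ===== VERDICT (by name: the statement is the Claim_ definition above) =====
theorem rank_scores_spec : Claim_equal_rank_scores := by
  intro points _
  unfold Spec_rank_scores rank_scores rank_scores_alt
  simp only []
  set items := (PySem.Dict.ofList points).items with hitems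
  set ordered := PySem.List.sorted2 items (fun item => -item.2) (fun item => item.1) with hord
  -- A side: loop = recA = grp = rankMap on the common sorted list
  rw [foldA ordered 1 1 none 1 []]
  rw [recA_eq_grp ordered.length ordered le_rfl 1 none 1 (by intro y _ h; simp at h)]
  rw [grp_eq_rankMap ordered.length ordered le_rfl (sorted2_pairwise_snd_ge items) 1]
  simp only [List.nil_append]
  -- B side: counts = counter, rank_of lookup = 1 + countP of strictly larger scores
  have hvals : (PySem.Dict.ofList points).values = items.map (·.2) := rfl
  rw [PySem.Dict.foldl_insert_getD_add_one_eq_counter]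
  set values := (PySem.Dict.ofList points).values with hv
  rw [PySem.Dict.keys_counter]
  set ks := PySem.List.sorted (PySem.Set.ofList values) (fun s => s) true with hks
  have hndks : ks.Nodup :=
    ((PySem.List.sorted_perm (PySem.Set.ofList values) (fun s => s) true).symm).nodup
      (PySem.Set.nodup_ofList values)
  have hdesc : ks.Pairwise (fun a b => b < a) := by
    have h1 : ks.Pairwise (fun a b => b ≤ a) :=
      PySem.List.sorted_pairwise_rev (PySem.Set.ofList values) (fun s => s)
    exact (h1.and hndks).imp (fun h => lt_of_le_of_ne h.1 (Ne.symm h.2))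
  unfold rankMap
  apply List.map_congr_left
  intro ts hts
  have htsit : ts ∈ items := (PySem.List.sorted2_perm items _ _ _).mem_iff.mp hts
  have htsv : ts.2 ∈ values := by
    rw [hvals]; exact List.mem_map_of_mem htsit
  have htsks : ts.2 ∈ ks := by
    rw [hks, PySem.List.mem_sorted]
    exact (PySem.Set.mem_ofList _ _).mpr htsv
  rw [rkFold_mem (fun k => (PySem.Dict.counter values).getD k 0) ts.2 ks hdesc _ 0 htsks]
  rw [takeWhile_eq_filter_desc ts.2 ks hdesc]
  have hmapc : ((ks.filter (fun k => decide (ts.2 < k))).map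
      (fun k => (PySem.Dict.counter values).getD k 0))
      = ((ks.filter (fun k => decide (ts.2 < k))).map (fun k => (values.count k : Int))) :=
    List.map_congr_left (fun k _ => PySem.Dict.getD_counter values k)
  rw [hmapc]
  rw [sum_count_filter_eq_countP (fun k => decide (ts.2 < k)) values ks hndks
    (fun v hv' => by rw [hks, PySem.List.mem_sorted]; exact (PySem.Set.mem_ofList _ _).mpr hv')]
  have hcount : values.countP (fun k => decide (ts.2 < k))
      = ordered.countP (fun y => decide (ts.2 < y.2)) := by
    rw [hvals, List.countP_map]
    exact ((PySem.List.sorted2_perm items (fun item => -item.2) (fun item => item.1) false).countP_eq _).symm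
  rw [hcount]
  simp only [Prod.mk.injEq, and_true]
  ring
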